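-- pv_equiv track=rewrite | github.com/mrveiss/AutoBot-AI | backend/api/analytics_bug_prediction.py | _parse_git_bug_history_lines
-- ===== SOURCE A (Python) =====
-- def _parse_git_bug_history_lines(lines: list[str]) -> dict[str, int]:
--     """Parse git log output to count bug fixes per file. (Issue #315 - extracted)"""
--     file_bug_counts: dict[str, int] = {}
--     current_files: list[str] = []
--
--     for line in lines:
--         if not line or line.startswith(" "):
--             continue
--         # This is either a commit hash or a file
--         if "/" in line or line.endswith(".py") or line.endswith(".vue"):
--             for f in current_files:
--                 file_bug_counts[f] = file_bug_counts.get(f, 0) + 1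
--             current_files = [line]
--         else:
--             current_files = []
--
--     return file_bug_counts
-- ===== SOURCE B (Python) =====
-- def _parse_git_bug_history_lines(lines: list[str]) -> dict[str, int]:
--     """Count bug fixes per file: filter relevant lines once, then scan adjacent pairs."""
--     def is_file(s: str) -> bool:
--         return "/" in s or s.endswith(".py") or s.endswith(".vue")
--
--     relevant = [l for l in lines if l and not l.startswith(" ")]
--     counts: dict[str, int] = {}
--     for cur, nxt in zip(relevant, relevant[1:]):
--         if is_file(cur) and is_file(nxt):
--             counts[cur] = counts.get(cur, 0) + 1
--     return counts
-- ===== Notes on version B (the rewrite author's own statement) =====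
-- stated objective: simpler
-- what changed: Replaced A's stateful loop carrying a pending current_files list across iterations with a stateless two-phase form: filter the relevant lines once, then count a line whenever it and its successor in the filtered list are both file-like.
import Mathlib
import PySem

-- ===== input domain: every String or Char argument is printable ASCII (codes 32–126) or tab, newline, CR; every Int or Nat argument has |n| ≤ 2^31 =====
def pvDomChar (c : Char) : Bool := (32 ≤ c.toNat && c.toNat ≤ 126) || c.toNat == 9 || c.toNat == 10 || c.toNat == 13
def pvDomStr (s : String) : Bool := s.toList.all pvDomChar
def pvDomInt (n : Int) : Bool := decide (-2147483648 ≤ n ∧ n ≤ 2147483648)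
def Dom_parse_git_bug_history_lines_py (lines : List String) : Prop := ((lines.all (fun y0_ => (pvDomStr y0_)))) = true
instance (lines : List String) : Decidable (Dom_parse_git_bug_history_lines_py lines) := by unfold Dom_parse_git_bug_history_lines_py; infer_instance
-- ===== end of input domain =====

-- B replaces A's stateful loop (a pending `current_files` list carried across iterations) by a
-- stateless two-phase form: filter the relevant lines once, then count each adjacent file-like pair
-- in the filtered list; objective: simpler. Return-value equivalence only (neither mutates input).

-- ===== PORT A =====
-- '"/" in line or line.endswith(".py") or line.endswith(".vue")' (A tests it inline; named for the port)
def pvAIsFile (line : String) : Bool :=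
  PySem.Str.isIn "/" line || PySem.Str.endswith line ".py" || PySem.Str.endswith line ".vue"

-- one iteration of A's for-loop; state = (file_bug_counts, current_files)
def pvAStep (st : PySem.Dict String Int × List String) (line : String) :
    PySem.Dict String Int × List String :=
  if line == "" || PySem.Str.startswith line " " then st
  else if pvAIsFile line then
    (st.2.foldl (fun d f => d.insert f (d.getD f 0 + 1)) st.1, [line])
  else (st.1, [])

def parse_git_bug_history_lines_py (lines : List String) : List (String × Int) :=
  ((lines.foldl pvAStep (PySem.Dict.empty, [])).1).items

-- ===== PORT B =====
def pvBIsFile (s : String) : Bool :=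
  PySem.Str.isIn "/" s || PySem.Str.endswith s ".py" || PySem.Str.endswith s ".vue"

-- 'for cur, nxt in zip(relevant, relevant[1:]): …' — walk adjacent pairs of the filtered list
def pvBPairs (d : PySem.Dict String Int) : List String → PySem.Dict String Int
  | x :: y :: rest =>
      pvBPairs (if pvBIsFile x && pvBIsFile y then d.insert x (d.getD x 0 + 1) else d) (y :: rest)
  | _ => d

def parse_git_bug_history_lines_py_alt (lines : List String) : List (String × Int) :=
  (pvBPairs PySem.Dict.empty
    (lines.filter (fun l => !(l == "" || PySem.Str.startswith l " ")))).items

-- ===== PRECONDITION & SPEC =====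
def Spec_parse_git_bug_history_lines_py (lines : List String) (out : List (String × Int)) : Prop := out = parse_git_bug_history_lines_py_alt lines
instance (lines : List String) (out : List (String × Int)) : Decidable (Spec_parse_git_bug_history_lines_py lines out) := by unfold Spec_parse_git_bug_history_lines_py; infer_instance

-- ===== CLAIM (what is proved, stated in full; the proofs are below) =====
def Claim_equal_parse_git_bug_history_lines_py : Prop := ∀ (lines : List String), Dom_parse_git_bug_history_lines_py lines → Spec_parse_git_bug_history_lines_py lines (parse_git_bug_history_lines_py lines)

-- ===== LEMMAS AND PROOFS =====

-- irrelevant lines leave A's state unchanged, so the fold over `lines` is the fold over the filtered list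
theorem pvA_foldl_filter (lines : List String) (st : PySem.Dict String Int × List String) :
    lines.foldl pvAStep st
      = (lines.filter (fun l => !(l == "" || PySem.Str.startswith l " "))).foldl pvAStep st := by
  induction lines generalizing st with
  | nil => rfl
  | cons x rest ih =>
      by_cases hx : (x == "" || PySem.Str.startswith x " ") = true
      · have hx' : x = "" ∨ PySem.Chars.startswith x.toList [' '] = true := by simpa using hx
        have hstep : pvAStep st x = st := by
          simp only [pvAStep]
          rw [if_pos (by simpa using hx')]
        simp only [List.foldl_cons, List.filter_cons, hstep]
        rw [if_neg (by rcases hx' with h1 | h1 <;> simp [h1]), ih]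
      · have hx' : ¬x = "" ∧ PySem.Chars.startswith x.toList [' '] = false := by
          simpa using hx
        simp only [List.foldl_cons, List.filter_cons]
        rw [if_pos (by simpa using hx'), List.foldl_cons, ih]

-- a non-file-like head contributes no pair
theorem pvBPairs_skip (d : PySem.Dict String Int) (x : String) (rs : List String)
    (hx : pvBIsFile x = false) : pvBPairs d (x :: rs) = pvBPairs d rs := by
  cases rs with
  | nil => rfl
  | cons y rest => simp [pvBPairs, hx]

-- loop correspondence on a list of relevant lines: empty pending state ↔ plain pair scan,
-- pending file f ↔ pair scan with f prepended
theorem pvKey (rs : List String)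
    (hrel : ∀ r ∈ rs, (!(r == "" || PySem.Str.startswith r " ")) = true) :
    (∀ d : PySem.Dict String Int, (rs.foldl pvAStep (d, [])).1 = pvBPairs d rs) ∧
    (∀ (d : PySem.Dict String Int) (f : String), pvBIsFile f = true →
      (rs.foldl pvAStep (d, [f])).1 = pvBPairs d (f :: rs)) := by
  induction rs with
  | nil =>
      refine ⟨fun d => rfl, fun d f _ => rfl⟩
  | cons x rest ih =>
      have hx : ¬x = "" ∧ PySem.Chars.startswith x.toList [' '] = false := by
        have := hrel x (List.mem_cons_self)
        simpa using this
      have ih' := ih (fun r hr => hrel r (List.mem_cons_of_mem _ hr))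
      constructor
      · intro d
        by_cases hfx : pvAIsFile x = true
        · have hstep : pvAStep (d, ([] : List String)) x = (d, [x]) := by
            simp [pvAStep, hx.1, hx.2, hfx]
          rw [List.foldl_cons, hstep, ih'.2 d x hfx]
        · have hfx' : pvBIsFile x = false := by simpa [pvAIsFile, pvBIsFile] using hfx
          have hstep : pvAStep (d, ([] : List String)) x = (d, []) := by
            simp [pvAStep, hx.1, hx.2, hfx]
          rw [List.foldl_cons, hstep, ih'.1 d, pvBPairs_skip d x rest hfx']
      · intro d f hf
        by_cases hfx : pvAIsFile x = true
        · have hstep : pvAStep (d, [f]) x = (d.insert f (d.getD f 0 + 1), [x]) := by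
            simp [pvAStep, hx.1, hx.2, hfx]
          have hfx' : pvBIsFile x = true := hfx
          rw [List.foldl_cons, hstep, ih'.2 _ x hfx]
          simp [pvBPairs, hf, hfx']
        · have hfx' : pvBIsFile x = false := by simpa [pvAIsFile, pvBIsFile] using hfx
          have hstep : pvAStep (d, [f]) x = (d, []) := by
            simp [pvAStep, hx.1, hx.2, hfx]
          rw [List.foldl_cons, hstep, ih'.1 d]
          simp [pvBPairs, hf, hfx', pvBPairs_skip d x rest hfx']

-- ===== VERDICT (by name: the statement is the Claim_ definition above) =====
theorem parse_git_bug_history_lines_py_spec : Claim_equal_parse_git_bug_history_lines_py := by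
  intro lines _
  unfold Spec_parse_git_bug_history_lines_py parse_git_bug_history_lines_py parse_git_bug_history_lines_py_alt
  rw [pvA_foldl_filter]
  congr 1
  exact (pvKey _ (fun r hr => (List.mem_filter.mp hr).2)).1 PySem.Dict.empty
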